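-- pv_equiv track=rewrite | github.com/FullCircleMUD/game | commands/npc_cmds/cmdset_trainer.py | _match_in_list
-- ===== SOURCE A (Python) =====
-- def _match_in_list(item_list, user_input):
--     """
--     Match user input against a list of keys.
--     Tries exact, then prefix, then substring.
--     """
--     user_input = user_input.replace(" ", "_").lower()
--
--     if user_input in item_list:
--         return user_input
--
--     matches = [s for s in item_list if s.startswith(user_input)]
--     if len(matches) == 1:
--         return matches[0]
--
--     matches = [
--         s for s in item_list
--         if user_input in s or user_input in s.replace("_", " ")
--     ]
--     if len(matches) == 1:
--         return matches[0]
--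
--     return None
-- ===== SOURCE B (Python) =====
-- def _match_in_list(item_list, user_input):
--     """Hierarchical narrowing: filter once on the coarsest predicate (substring),
--     then refine inside that candidate set, exploiting exact => prefix => substring."""
--     ui = user_input.replace(" ", "_").lower()
--     # every exact or prefix match is also a substring match, so one coarse filter suffices
--     candidates = [s for s in item_list if ui in s or ui in s.replace("_", " ")]
--     if ui in candidates:
--         return ui
--     prefixes = [s for s in candidates if s.startswith(ui)]
--     if len(prefixes) == 1:
--         return prefixes[0]
--     if len(candidates) == 1:
--         return candidates[0]
--     return None
-- ===== Notes on version B (the rewrite author's own statement) =====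
-- stated objective: alternative
-- what changed: B filters item_list once on the coarsest predicate (substring containment) and performs the exact-membership and prefix tests only inside that candidate subset, relying on the containment exact => prefix => substring, instead of A's three independent full-list scans.
import Mathlib
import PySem

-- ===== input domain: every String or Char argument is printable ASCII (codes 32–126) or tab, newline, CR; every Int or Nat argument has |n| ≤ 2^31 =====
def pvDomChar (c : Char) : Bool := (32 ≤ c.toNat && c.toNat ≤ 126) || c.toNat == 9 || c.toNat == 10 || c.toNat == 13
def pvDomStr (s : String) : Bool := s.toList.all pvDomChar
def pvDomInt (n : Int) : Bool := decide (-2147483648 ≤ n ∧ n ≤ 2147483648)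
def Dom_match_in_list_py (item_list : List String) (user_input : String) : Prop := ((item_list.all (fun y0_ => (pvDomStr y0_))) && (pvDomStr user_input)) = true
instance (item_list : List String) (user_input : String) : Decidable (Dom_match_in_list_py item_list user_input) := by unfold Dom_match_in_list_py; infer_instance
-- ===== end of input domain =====

-- B filters once on the coarsest predicate (substring) and refines inside that candidate set; alternative decomposition, same cost class.

-- ===== PORT A =====
def match_in_list_py (item_list : List String) (user_input : String) : Option String :=
  let ui := PySem.Str.lower (PySem.Str.replace user_input " " "_")
  if ui ∈ item_list then some ui
  else
    let matches1 := item_list.filter (fun s => PySem.Str.startswith s ui)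
    if matches1.length == 1 then matches1.head?
    else
      let matches2 := item_list.filter (fun s =>
        PySem.Str.isIn ui s || PySem.Str.isIn ui (PySem.Str.replace s "_" " "))
      if matches2.length == 1 then matches2.head?
      else none

-- ===== PORT B =====
def match_in_list_py_alt (item_list : List String) (user_input : String) : Option String :=
  let ui := PySem.Str.lower (PySem.Str.replace user_input " " "_")
  let candidates := item_list.filter (fun s =>
    PySem.Str.isIn ui s || PySem.Str.isIn ui (PySem.Str.replace s "_" " "))
  if ui ∈ candidates then some ui
  else
    let prefixes := candidates.filter (fun s => PySem.Str.startswith s ui)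
    if prefixes.length == 1 then prefixes.head?
    else if candidates.length == 1 then candidates.head?
    else none

-- ===== PRECONDITION & SPEC =====
def Spec_match_in_list_py (item_list : List String) (user_input : String) (out : Option String) : Prop := out = match_in_list_py_alt item_list user_input
instance (item_list : List String) (user_input : String) (out : Option String) : Decidable (Spec_match_in_list_py item_list user_input out) := by unfold Spec_match_in_list_py; infer_instance

-- ===== CLAIM (what is proved, stated in full; the proofs are below) =====
def Claim_equal_match_in_list_py : Prop := ∀ (item_list : List String) (user_input : String), Dom_match_in_list_py item_list user_input → Spec_match_in_list_py item_list user_input (match_in_list_py item_list user_input)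

-- ===== LEMMAS AND PROOFS =====

-- every char list contains itself as a substring
lemma pvIsIn_self (l : List Char) : PySem.Chars.isIn l l = true :=
  (PySem.Chars.isIn_iff_infix l l).mpr (List.infix_refl _)

-- a prefix match is also a substring match
lemma pvPrefix_sub (s p : List Char) (h : PySem.Chars.startswith s p = true) :
    PySem.Chars.isIn p s = true := by
  have h2 := (PySem.Chars.startswith_iff s p).mp h
  exact (PySem.Chars.isIn_iff_infix p s).mpr h2.isInfix

theorem match_in_list_py_spec : Claim_equal_match_in_list_py := by
  intro item_list user_input _
  simp only [Spec_match_in_list_py, match_in_list_py, match_in_list_py_alt]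
  set ui := PySem.Str.lower (PySem.Str.replace user_input " " "_") with hui
  have hmem : (ui ∈ item_list.filter (fun s =>
      PySem.Str.isIn ui s || PySem.Str.isIn ui (PySem.Str.replace s "_" " "))) ↔ ui ∈ item_list := by
    simp [List.mem_filter, pvIsIn_self]
  have hfilt : (item_list.filter (fun s =>
        PySem.Str.isIn ui s || PySem.Str.isIn ui (PySem.Str.replace s "_" " "))).filter
        (fun s => PySem.Str.startswith s ui)
      = item_list.filter (fun s => PySem.Str.startswith s ui) := by
    rw [List.filter_filter]
    apply List.filter_congr
    intro a _
    cases h : PySem.Chars.startswith a.toList ui.toList with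
    | false => simp [PySem.Str.startswith_eq, h]
    | true => simp [PySem.Str.startswith_eq, PySem.Str.isIn_eq, h, pvPrefix_sub a.toList ui.toList h]
  by_cases hm : ui ∈ item_list
  · rw [if_pos hm, if_pos (hmem.mpr hm)]
  · rw [if_neg hm, if_neg (fun h => hm (hmem.mp h)), hfilt]

-- ===== VERDICT (by name: the statement is the Claim_ definition above) =====
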